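-- pv_equiv track=rewrite | github.com/diegoabeltran16/tiddly-data-converter | python_scripts/session_cycle_diagnostics.py | parse_tw_tags
-- ===== SOURCE A (Python) =====
-- from typing import Any, Iterable
--
-- def parse_tw_tags(value: Any) -> list[str]:
--     if isinstance(value, list):
--         return [str(item) for item in value if str(item).strip()]
--     if not isinstance(value, str):
--         return []
--     tags: list[str] = []
--     index = 0
--     while index < len(value):
--         if value.startswith("[[", index):
--             end = value.find("]]", index + 2)
--             if end == -1:
--                 break
--             tags.append(value[index + 2 : end])
--             index = end + 2
--             continue
--         if value[index].isspace():
--             index += 1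
--             continue
--         end = index
--         while end < len(value) and not value[end].isspace():
--             end += 1
--         tags.append(value[index:end])
--         index = end
--     return [tag for tag in tags if tag]
-- ===== SOURCE B (Python) =====
-- from typing import Any
--
--
-- def parse_tw_tags(value: Any) -> list[str]:
--     if isinstance(value, list):
--         return [str(item) for item in value if str(item).strip()]
--     if not isinstance(value, str):
--         return []
--     out: list[str] = []
--     state = "gap"  # gap | lbr (lone '[' seen) | word | brk (inside [[ ... ]])
--     buf = ""
--     for ch in value:
--         if state == "gap":
--             if ch.isspace():
--                 pass
--             elif ch == "[":
--                 state = "lbr"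
--             else:
--                 state, buf = "word", ch
--         elif state == "lbr":
--             if ch == "[":
--                 state, buf = "brk", ""
--             elif ch.isspace():
--                 out.append("[")
--                 state = "gap"
--             else:
--                 state, buf = "word", "[" + ch
--         elif state == "word":
--             if ch.isspace():
--                 out.append(buf)
--                 state = "gap"
--             else:
--                 buf += ch
--         else:  # brk
--             if ch == "]" and buf.endswith("]"):
--                 out.append(buf[:-1])
--                 state = "gap"
--             else:
--                 buf += ch
--     if state == "word":
--         out.append(buf)
--     elif state == "lbr":
--         out.append("[")
--     # an unterminated '[[...' is discarded, like in the original
--     return [t for t in out if t]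
-- ===== Notes on version B (the rewrite author's own statement) =====
-- stated objective: alternative
-- what changed: A jumps around the string with index arithmetic, startswith('[[',i) and find(']]',i+2); B is a single-pass character state machine (gap/lone-bracket/word/bracket states) folded over the string.
import Mathlib
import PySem

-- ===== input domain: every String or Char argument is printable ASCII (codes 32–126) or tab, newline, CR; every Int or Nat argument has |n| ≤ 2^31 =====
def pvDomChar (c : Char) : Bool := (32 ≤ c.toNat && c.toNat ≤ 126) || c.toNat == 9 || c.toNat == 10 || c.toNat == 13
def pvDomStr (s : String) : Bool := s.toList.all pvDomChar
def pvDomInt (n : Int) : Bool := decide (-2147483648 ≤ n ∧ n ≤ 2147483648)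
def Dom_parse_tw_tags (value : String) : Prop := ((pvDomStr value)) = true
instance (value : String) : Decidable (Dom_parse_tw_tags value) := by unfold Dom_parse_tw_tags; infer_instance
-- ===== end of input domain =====

-- B replaces A's index-jumping scan (startswith/find with explicit indices) by a one-pass
-- character state machine; same values, no speed claim. (The list/non-str guards of the
-- Python do not arrive here: the Lean signature is String.)

-- ===== PORT A =====

-- value.find("]]", index+2), transcribed on the suffix after index+2: the offset of the
-- first "]]" in the suffix (none = -1). Exact: CPython's find scans left to right.
def findRR : List Char → Option Nat
  | [] => none
  | [_] => none
  | a :: b :: t => if a = ']' ∧ b = ']' then some 0 else (findRR (b :: t)).map (· + 1)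

-- the while loop of A, as structural recursion on the suffix of the string at `index`
def loopA : List Char → List String
  | [] => []
  | c :: cs =>
    if c = '[' ∧ cs.head? = some '[' then        -- value.startswith("[[", index)
      match findRR cs.tail with
      | none => []                               -- end == -1: break
      | some k => String.mk (cs.tail.take k) :: loopA (cs.tail.drop (k + 2))
    else if h : PySem.Chars.isspace c then loopA cs
    else                                         -- inner while: scan to next whitespace
      String.mk (List.takeWhile (fun d => !PySem.Chars.isspace d) (c :: cs)) ::
        loopA (List.dropWhile (fun d => !PySem.Chars.isspace d) (c :: cs))
  termination_by cs => cs.length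
  decreasing_by
  all_goals first
    | (simp; done)
    | (simp; omega; done)
    | (have := List.length_dropWhile_le (fun d => !PySem.Chars.isspace d) cs
       simp_all [List.dropWhile_cons]
       try omega
       done)

def parse_tw_tags (value : String) : List String :=
  (loopA value.toList).filter (fun t => t ≠ "")

-- ===== PORT B =====

inductive BState where
  | gap : BState
  | lbr : BState
  | word : List Char → BState
  | brk : List Char → BState
deriving DecidableEq, Repr

def stepB (s : List String × BState) (ch : Char) : List String × BState :=
  match s with
  | (out, .gap) =>
    if PySem.Chars.isspace ch then (out, .gap)
    else if ch = '[' then (out, .lbr)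
    else (out, .word [ch])
  | (out, .lbr) =>
    if ch = '[' then (out, .brk [])
    else if PySem.Chars.isspace ch then (out ++ ["["], .gap)
    else (out, .word ('[' :: [ch]))
  | (out, .word buf) =>
    if PySem.Chars.isspace ch then (out ++ [String.mk buf], .gap)
    else (out, .word (buf ++ [ch]))
  | (out, .brk buf) =>
    if ch = ']' ∧ buf.getLast? = some ']' then (out ++ [String.mk buf.dropLast], .gap)
    else (out, .brk (buf ++ [ch]))

def flushB (s : List String × BState) : List String :=
  match s with
  | (out, .word buf) => out ++ [String.mk buf]
  | (out, .lbr) => out ++ ["["]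
  | (out, _) => out

def parse_tw_tags_alt (value : String) : List String :=
  (flushB (value.toList.foldl stepB ([], .gap))).filter (fun t => t ≠ "")

-- ===== PRECONDITION & SPEC =====
def Spec_parse_tw_tags (value : String) (out : List String) : Prop := out = parse_tw_tags_alt value
instance (value : String) (out : List String) : Decidable (Spec_parse_tw_tags value out) := by unfold Spec_parse_tw_tags; infer_instance

-- ===== CLAIM (what is proved, stated in full; the proofs are below) =====
def Claim_equal_parse_tw_tags : Prop := ∀ (value : String), Dom_parse_tw_tags value → Spec_parse_tw_tags value (parse_tw_tags value)

-- ===== LEMMAS AND PROOFS =====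

lemma findRR_map_none {t : List Char} {f : Nat → Nat} (h : (findRR t).map f = none) :
    findRR t = none := by cases hh : findRR t <;> simp [hh] at h ⊢

-- a word run: consume the maximal non-space prefix, emit the token, go back to gap
lemma L1 (cs : List Char) : ∀ (out : List String) (buf : List Char),
    flushB (cs.foldl stepB (out, .word buf)) =
      flushB ((cs.dropWhile (fun d => !PySem.Chars.isspace d)).foldl stepB
        (out ++ [String.mk (buf ++ cs.takeWhile (fun d => !PySem.Chars.isspace d))], .gap)) := by
  induction cs with
  | nil => intro out buf; simp [flushB]
  | cons c cs ih =>
    intro out buf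
    by_cases hs : PySem.Chars.isspace c
    · have hstep : stepB (out, .word buf) c = (out ++ [String.mk buf], .gap) := by
        simp [stepB, hs]
      simp only [List.foldl_cons, hstep, List.dropWhile_cons, List.takeWhile_cons, hs,
        Bool.not_true]
      have hstep2 : stepB (out ++ [String.mk buf], .gap) c = (out ++ [String.mk buf], .gap) := by
        simp [stepB, hs]
      simp [hstep2]
    · have hstep : stepB (out, .word buf) c = (out, .word (buf ++ [c])) := by
        simp [stepB, hs]
      simp only [List.foldl_cons, hstep, List.dropWhile_cons, List.takeWhile_cons, hs,
        Bool.not_false]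
      rw [ih]
      simp

lemma noRR_snoc {b : List Char} {c : Char} (h : findRR b = none)
    (h2 : ¬ (c = ']' ∧ b.getLast? = some ']')) : findRR (b ++ [c]) = none := by
  induction b with
  | nil => simp [findRR]
  | cons a t ih =>
    cases t with
    | nil =>
      simp [findRR] at h2 ⊢
      intro ha hc; exact h2 hc ha
    | cons a2 t2 =>
      simp only [findRR] at h
      split at h
      · simp at h
      · rename_i hno
        have ht : findRR (a2 :: t2) = none := findRR_map_none h
        have hrec : findRR (a2 :: t2 ++ [c]) = none := ih ht (by simpa using h2)
        have hrec' : findRR (a2 :: (t2 ++ [c])) = none := by simpa using hrec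
        simp only [List.cons_append, findRR]
        rw [if_neg hno, hrec']
        rfl

lemma findRR_close {b : List Char} (cs : List Char) (h : findRR b = none)
    (h2 : b.getLast? = some ']') : findRR (b ++ ']' :: cs) = some (b.length - 1) := by
  induction b with
  | nil => simp at h2
  | cons a t ih =>
    cases t with
    | nil =>
      simp at h2
      simp [findRR, h2]
    | cons a2 t2 =>
      simp only [findRR] at h
      split at h
      · simp at h
      · rename_i hno
        have ht : findRR (a2 :: t2) = none := findRR_map_none h
        have hrec : findRR (a2 :: t2 ++ ']' :: cs) = some ((a2 :: t2).length - 1) :=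
          ih ht (by simpa using h2)
        have hrec' : findRR (a2 :: (t2 ++ ']' :: cs)) = some ((a2 :: t2).length - 1) := by
          simpa using hrec
        simp only [List.cons_append, findRR]
        rw [if_neg hno, hrec']
        simp

lemma findRR_append_lb {b cs : List Char} {i : Nat} (h : findRR b = none)
    (h2 : findRR (b ++ cs) = some i) : b.length ≤ i + 1 := by
  induction b generalizing i with
  | nil => simp
  | cons a t ih =>
    cases t with
    | nil => simp
    | cons a2 t2 =>
      simp only [findRR] at h
      split at h
      · simp at h
      · rename_i hno
        have ht : findRR (a2 :: t2) = none := findRR_map_none h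
        simp only [List.cons_append, findRR] at h2
        rw [if_neg hno] at h2
        cases hv : findRR (a2 :: (t2 ++ cs)) with
        | none => rw [hv] at h2; simp at h2
        | some j =>
          rw [hv] at h2
          have hj : j + 1 = i := by simpa using h2
          have hv' : findRR (a2 :: t2 ++ cs) = some j := by simpa using hv
          have := ih ht hv'
          simp at this ⊢
          omega

-- a bracket run: close at the first "]]" of buf ++ cs, or discard at end of input
lemma L2 (cs : List Char) : ∀ (out : List String) (b : List Char), findRR b = none →
    flushB (cs.foldl stepB (out, .brk b)) =
      match findRR (b ++ cs) with
      | none => out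
      | some i => flushB ((cs.drop (i + 2 - b.length)).foldl stepB
          (out ++ [String.mk ((b ++ cs).take i)], .gap)) := by
  induction cs with
  | nil =>
    intro out b h
    simp [flushB, h]
  | cons c cs ih =>
    intro out b h
    by_cases hc : c = ']' ∧ b.getLast? = some ']'
    · obtain ⟨hc1, hc2⟩ := hc
      subst hc1
      have hstep : stepB (out, .brk b) ']' = (out ++ [String.mk b.dropLast], .gap) := by
        simp [stepB, hc2]
      have hfind : findRR (b ++ ']' :: cs) = some (b.length - 1) := findRR_close cs h hc2
      have hb1 : 1 ≤ b.length := by cases b <;> simp_all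
      simp only [List.foldl_cons, hstep]
      rw [hfind]
      have hdrop : (']' :: cs).drop (b.length - 1 + 2 - b.length) = cs := by
        have h1 : b.length - 1 + 2 - b.length = 1 := by omega
        simp [h1]
      have htake : (b ++ ']' :: cs).take (b.length - 1) = b.dropLast := by
        rw [List.take_append_of_le_length (by omega)]
        rw [List.dropLast_eq_take]
      simp [hdrop, htake]
    · have hstep : stepB (out, .brk b) c = (out, .brk (b ++ [c])) := by
        simp only [stepB]
        rw [if_neg hc]
      have hb' : findRR (b ++ [c]) = none := noRR_snoc h hc
      simp only [List.foldl_cons, hstep]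
      rw [ih _ _ hb']
      have hassoc : (b ++ [c]) ++ cs = b ++ c :: cs := by simp
      rw [hassoc]
      cases hv : findRR (b ++ c :: cs) with
      | none => rfl
      | some i =>
        have hge : b.length + 1 ≤ i + 1 := by
          have := findRR_append_lb hb' (by rw [hassoc]; exact hv)
          simpa using this
        have harith : i + 2 - (b.length + 1) = i + 2 - b.length - 1 := by omega
        have hpos : i + 2 - b.length = (i + 2 - b.length - 1) + 1 := by omega
        have hd : (c :: cs).drop (i + 2 - b.length) = cs.drop (i + 2 - b.length - 1) := by
          conv_lhs => rw [hpos]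
          rw [List.drop_succ_cons]
        simp [harith, hd]

lemma mainEq : ∀ (n : Nat) (cs : List Char), cs.length ≤ n → ∀ (out : List String),
    flushB (cs.foldl stepB (out, .gap)) = out ++ loopA cs := by
  intro n
  induction n with
  | zero =>
    intro cs hlen out
    have : cs = [] := by cases cs <;> simp_all
    subst this; simp [flushB, loopA]
  | succ n ih =>
    intro cs hlen out
    cases cs with
    | nil => simp [flushB, loopA]
    | cons c cs' =>
      by_cases hbr : c = '[' ∧ cs'.head? = some '['
      · obtain ⟨hc, hh⟩ := hbr
        subst hc
        cases cs' with
        | nil => simp at hh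
        | cons d cs'' =>
          have hd : d = '[' := by simpa using hh
          subst hd
          have hsp : PySem.Chars.isspace '[' = false := by decide
          have hstep1 : stepB (out, .gap) '[' = (out, .lbr) := by
            simp [stepB, hsp]
          have hstep2 : stepB (out, .lbr) '[' = (out, .brk []) := by
            simp [stepB]
          simp only [List.foldl_cons, hstep1, hstep2]
          rw [L2 cs'' out [] (by simp [findRR])]
          simp only [List.nil_append, List.length_nil, Nat.sub_zero]
          have hloop : loopA ('[' :: '[' :: cs'') =
              match findRR cs'' with
              | none => []
              | some k => String.mk (cs''.take k) :: loopA (cs''.drop (k + 2)) := by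
            rw [loopA, if_pos ⟨rfl, rfl⟩]
            rfl
          rw [hloop]
          cases hv : findRR cs'' with
          | none => simp
          | some k =>
            have hih := ih (cs''.drop (k + 2)) (by simp at hlen ⊢; omega)
              (out ++ [String.mk (cs''.take k)])
            simp [hih]
      · by_cases hs : PySem.Chars.isspace c
        · have hcne : c ≠ '[' := by
            intro h; subst h; revert hs; decide
          have hstep : stepB (out, .gap) c = (out, .gap) := by simp [stepB, hs]
          simp only [List.foldl_cons, hstep]
          rw [ih cs' (by simp at hlen; omega) out]
          rw [loopA, if_neg hbr, dif_pos hs]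
        · -- c is not a space; A scans a word, B goes through lbr or word
          have hloop : loopA (c :: cs') =
              String.mk (List.takeWhile (fun d => !PySem.Chars.isspace d) (c :: cs')) ::
                loopA (List.dropWhile (fun d => !PySem.Chars.isspace d) (c :: cs')) := by
            rw [loopA, if_neg hbr, dif_neg hs]
          by_cases hc : c = '['
          · subst hc
            have hsp : PySem.Chars.isspace '[' = false := by decide
            have hone : String.mk ['['] = "[" := by decide
            have hstep1 : stepB (out, .gap) '[' = (out, .lbr) := by simp [stepB, hsp]
            cases cs' with
            | nil =>
              simp only [List.foldl_cons, hstep1, List.foldl_nil]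
              rw [hloop]
              have ht : List.takeWhile (fun d => !PySem.Chars.isspace d) ['['] = ['['] := by
                simp [hsp]
              have hdr : List.dropWhile (fun d => !PySem.Chars.isspace d) ['['] = [] := by
                simp [hsp]
              have h0 : loopA ([] : List Char) = [] := by rw [loopA]
              rw [ht, hdr, h0]
              simp [flushB, hone]
            | cons d cs'' =>
              have hdne : d ≠ '[' := by
                intro h; exact hbr ⟨rfl, by simp [h]⟩
              by_cases hds : PySem.Chars.isspace d
              · have hstep2 : stepB (out, .lbr) d = (out ++ ["["], .gap) := by
                  simp [stepB, hdne, hds]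
                simp only [List.foldl_cons, hstep1, hstep2]
                rw [ih cs'' (by simp at hlen; omega) (out ++ ["["])]
                rw [hloop]
                have ht : List.takeWhile (fun x => !PySem.Chars.isspace x) ('[' :: d :: cs'') = ['['] := by
                  simp [List.takeWhile_cons, hs, hds]
                have hdr : List.dropWhile (fun x => !PySem.Chars.isspace x) ('[' :: d :: cs'') = d :: cs'' := by
                  simp [List.dropWhile_cons, hs, hds]
                rw [ht, hdr]
                have hloop2 : loopA (d :: cs'') = loopA cs'' := by
                  rw [loopA, if_neg (fun hx => hdne hx.1), dif_pos hds]
                rw [hloop2]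
                simp [hone]
              · have hstep2 : stepB (out, .lbr) d = (out, .word ('[' :: [d])) := by
                  simp [stepB, hdne, hds]
                simp only [List.foldl_cons, hstep1, hstep2]
                rw [L1 cs'' out ('[' :: [d])]
                rw [ih _ (le_trans (List.length_dropWhile_le _ _) (by simp at hlen; omega)) _]
                rw [hloop]
                have ht : List.takeWhile (fun x => !PySem.Chars.isspace x) ('[' :: d :: cs'') =
                    '[' :: d :: List.takeWhile (fun x => !PySem.Chars.isspace x) cs'' := by
                  simp [List.takeWhile_cons, hs, hds]
                have hdr : List.dropWhile (fun x => !PySem.Chars.isspace x) ('[' :: d :: cs'') =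
                    List.dropWhile (fun x => !PySem.Chars.isspace x) cs'' := by
                  simp [List.dropWhile_cons, hs, hds]
                rw [ht, hdr]
                simp
          · have hstep : stepB (out, .gap) c = (out, .word [c]) := by
              simp [stepB, hs, hc]
            simp only [List.foldl_cons, hstep]
            rw [L1 cs' out [c]]
            rw [ih _ (le_trans (List.length_dropWhile_le _ _) (by simp at hlen; omega)) _]
            rw [hloop]
            have ht : List.takeWhile (fun x => !PySem.Chars.isspace x) (c :: cs') =
                c :: List.takeWhile (fun x => !PySem.Chars.isspace x) cs' := by
              simp [List.takeWhile_cons, hs]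
            have hdr : List.dropWhile (fun x => !PySem.Chars.isspace x) (c :: cs') =
                List.dropWhile (fun x => !PySem.Chars.isspace x) cs' := by
              simp [List.dropWhile_cons, hs]
            rw [ht, hdr]
            simp

-- ===== VERDICT (by name: the statement is the Claim_ definition above) =====
theorem parse_tw_tags_spec : Claim_equal_parse_tw_tags := by
  intro value _
  unfold Spec_parse_tw_tags parse_tw_tags parse_tw_tags_alt
  rw [mainEq value.toList.length value.toList le_rfl []]
  simp
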